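-- pv_equiv track=rewrite | github.com/sinhakrishnendu/babappa | BABAPPA/good clipgard/babappa_stopcodon_masker.py | validate_masking
-- ===== SOURCE A (Python) =====
-- def validate_masking(seq_str):
--     """
--     Validate that no stop codons remain in the masked sequence
--     """
--     if not seq_str or len(seq_str) < 3:
--         return True
--
--     for i in range(0, len(seq_str), 3):
--         if i + 3 > len(seq_str):
--             continue
--
--         codon = seq_str[i:i+3].upper()
--         if codon in {"TAA", "TAG", "TGA"}:
--             return False
--
--     return True
-- ===== SOURCE B (Python) =====
-- def validate_masking(seq_str):
--     """
--     Validate that no stop codons remain in the masked sequence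
--     """
--     it = iter(seq_str.upper())
--     for codon in zip(it, it, it):
--         if codon in {('T', 'A', 'A'), ('T', 'A', 'G'), ('T', 'G', 'A')}:
--             return False
--     return True
-- ===== Notes on version B (the rewrite author's own statement) =====
-- stated objective: idiomatic
-- what changed: Replaces the index/range loop with per-codon slicing and uppercasing by uppercasing the string once and making a single pass that consumes the iterator three characters at a time via zip(it, it, it), with no indexing, slicing or per-codon upper() calls.
import Mathlib
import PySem

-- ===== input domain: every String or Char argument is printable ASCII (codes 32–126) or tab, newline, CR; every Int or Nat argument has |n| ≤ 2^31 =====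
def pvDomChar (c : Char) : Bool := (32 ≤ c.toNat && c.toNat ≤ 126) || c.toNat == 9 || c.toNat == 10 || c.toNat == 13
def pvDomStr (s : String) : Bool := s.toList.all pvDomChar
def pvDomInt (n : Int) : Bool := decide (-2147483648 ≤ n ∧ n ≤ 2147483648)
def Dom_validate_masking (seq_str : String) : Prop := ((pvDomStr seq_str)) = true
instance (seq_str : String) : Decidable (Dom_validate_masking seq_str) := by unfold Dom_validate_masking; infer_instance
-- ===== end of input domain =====

-- B uppercases once and scans codon triples in a single pass (no indexing/slicing); same O(n) cost, more idiomatic.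


-- ===== PORT A =====
-- 'for i in range(0, len(seq_str), 3): …' with early 'return False', as index recursion stepping by 3
def vmLoopA (s : List Char) (i : Nat) : Bool :=
  if i < s.length then
    if s.length < i + 3 then vmLoopA s (i + 3)   -- 'if i + 3 > len(seq_str): continue'
    else
      let codon := PySem.Chars.upper (PySem.List.slice s (some (i : Int)) (some ((i : Int) + 3)))
      if codon = "TAA".toList || codon = "TAG".toList || codon = "TGA".toList then false
      else vmLoopA s (i + 3)
  else true
termination_by s.length - i

def validate_masking (seq_str : String) : Bool :=
  -- 'if not seq_str or len(seq_str) < 3: return True'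
  if seq_str.toList.length < 3 then true
  else vmLoopA seq_str.toList 0

-- ===== PORT B =====
-- 'for codon in zip(it, it, it): …' on the uppercased string: consume three chars per step
def vmLoopB : List Char → Bool
  | a :: b :: c :: rest =>
      if [a, b, c] = "TAA".toList || [a, b, c] = "TAG".toList || [a, b, c] = "TGA".toList then false
      else vmLoopB rest
  | _ => true

def validate_masking_alt (seq_str : String) : Bool :=
  vmLoopB (PySem.Chars.upper seq_str.toList)

-- ===== PRECONDITION & SPEC =====
def Spec_validate_masking (seq_str : String) (out : Bool) : Prop := out = validate_masking_alt seq_str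
instance (seq_str : String) (out : Bool) : Decidable (Spec_validate_masking seq_str out) := by unfold Spec_validate_masking; infer_instance

-- ===== CLAIM (what is proved, stated in full; the proofs are below) =====
def Claim_equal_validate_masking : Prop := ∀ (seq_str : String), Dom_validate_masking seq_str → Spec_validate_masking seq_str (validate_masking seq_str)

-- ===== LEMMAS AND PROOFS =====

-- A's loop at offset pref.length + i over pref ++ s is the loop at offset i over s
lemma vmLoopA_shift (pref s : List Char) :
    ∀ k i, s.length - i ≤ k → vmLoopA (pref ++ s) (pref.length + i) = vmLoopA s i := by
  intro k
  induction k with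
  | zero =>
    intro i hi
    have h1 : ¬ i < s.length := by omega
    have h2 : ¬ pref.length + i < (pref ++ s).length := by
      simp only [List.length_append]; omega
    conv_lhs => rw [vmLoopA]
    conv_rhs => rw [vmLoopA]
    rw [if_neg h2, if_neg h1]
  | succ k ih =>
    intro i hi
    conv_lhs => rw [vmLoopA]
    conv_rhs => rw [vmLoopA]
    by_cases h : i < s.length
    · have h2 : pref.length + i < (pref ++ s).length := by
        simp only [List.length_append]; omega
      have hslice : PySem.List.slice (pref ++ s) (some ((pref.length + i : Nat) : Int))
          (some (((pref.length + i : Nat) : Int) + 3)) =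
          PySem.List.slice s (some (i : Int)) (some ((i : Int) + 3)) := by
        have e1 : ((pref.length + i : Nat) : Int) + 3 = ((pref.length + i + 3 : Nat) : Int) := by
          push_cast; ring
        have e2 : ((i : Nat) : Int) + 3 = ((i + 3 : Nat) : Int) := by push_cast; ring
        rw [e1, e2, PySem.List.slice_natCast, PySem.List.slice_natCast,
            List.drop_length_add_append]
        simp
      have hrec : vmLoopA (pref ++ s) (pref.length + i + 3) = vmLoopA s (i + 3) := by
        have := ih (i + 3) (by omega)
        simpa [Nat.add_assoc] using this
      rw [if_pos h2, if_pos h]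
      by_cases h3 : s.length < i + 3
      · have h3' : (pref ++ s).length < pref.length + i + 3 := by
          simp only [List.length_append]; omega
        rw [if_pos h3', if_pos h3]
        exact hrec
      · have h3' : ¬ (pref ++ s).length < pref.length + i + 3 := by
          simp only [List.length_append]; omega
        rw [if_neg h3', if_neg h3]
        simp only [hslice]
        split
        · rfl
        · exact hrec
    · have h2 : ¬ pref.length + i < (pref ++ s).length := by
        simp only [List.length_append]; omega
      rw [if_neg h2, if_neg h]

-- A's loop from 0 computes B's chunked scan of the uppercased list
lemma vmLoopA_eq_vmLoopB :
    ∀ (n : Nat) (l : List Char), l.length ≤ n → vmLoopA l 0 = vmLoopB (PySem.Chars.upper l) := by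
  intro n
  induction n with
  | zero =>
    intro l hl
    match l, hl with
    | [], _ => rw [vmLoopA]; simp [PySem.Chars.upper, vmLoopB]
  | succ n ih =>
    intro l hl
    match l with
    | [] => rw [vmLoopA]; simp [PySem.Chars.upper, vmLoopB]
    | [a] =>
      conv_lhs => rw [vmLoopA]; rw [vmLoopA]
      simp [PySem.Chars.upper, vmLoopB]
    | [a, b] =>
      conv_lhs => rw [vmLoopA]; rw [vmLoopA]
      simp [PySem.Chars.upper, vmLoopB]
    | a :: b :: c :: rest =>
      conv_lhs => rw [vmLoopA]
      have h1 : 0 < (a :: b :: c :: rest).length := by simp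
      have h2 : ¬ (a :: b :: c :: rest).length < 0 + 3 := by simp
      rw [if_pos h1, if_neg h2]
      have hslice : PySem.List.slice (a :: b :: c :: rest) (some (0 : Int)) (some ((0 : Int) + 3)) =
          [a, b, c] := by
        have e : ((0 : Int) + 3) = ((3 : Nat) : Int) := by norm_num
        rw [e, PySem.List.slice_zero_start, PySem.List.slice_to_natCast]
        rfl
      have hshift : vmLoopA (a :: b :: c :: rest) (0 + 3) = vmLoopA rest 0 := by
        have := vmLoopA_shift [a, b, c] rest rest.length 0 (by omega)
        simpa using this
      have hrest : vmLoopA rest 0 = vmLoopB (PySem.Chars.upper rest) := by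
        apply ih
        simp only [List.length_cons] at hl
        omega
      have hupper : PySem.Chars.upper (a :: b :: c :: rest) =
          PySem.Chars.upperChar a :: PySem.Chars.upperChar b :: PySem.Chars.upperChar c ::
            PySem.Chars.upper rest := by
        simp [PySem.Chars.upper]
      simp only [Nat.cast_zero]
      rw [hslice, hshift, hrest, hupper, vmLoopB]
      simp [PySem.Chars.upper]

-- ===== VERDICT (by name: the statement is the Claim_ definition above) =====
theorem validate_masking_spec : Claim_equal_validate_masking := by
  intro s _
  unfold Spec_validate_masking validate_masking validate_masking_alt
  by_cases h : s.toList.length < 3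
  · simp only [h, if_true]
    match hm : s.toList, h with
    | [], _ => simp [PySem.Chars.upper, vmLoopB]
    | [a], _ => simp [PySem.Chars.upper, vmLoopB]
    | [a, b], _ => simp [PySem.Chars.upper, vmLoopB]
  · simp only [h, if_false]
    exact vmLoopA_eq_vmLoopB s.toList.length s.toList le_rfl
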